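-- pv_equiv track=rewrite | github.com/samay58/sherlock-homes | app/services/nlp.py | analyze_text_signals
-- ===== SOURCE A (Python) =====
-- from typing import List, Optional
--
-- def _unique_hits(text_lower: str, keywords: List[str]) -> List[str]:
--     hits = [kw for kw in keywords if kw in text_lower]
--     # Preserve order, remove duplicates
--     seen = set()
--     deduped: List[str] = []
--     for hit in hits:
--         if hit not in seen:
--             deduped.append(hit)
--             seen.add(hit)
--     return deduped
--
-- def analyze_text_signals(text: str, nlp_config: dict) -> dict:
--     """Analyze description text for buyer-specific positive/negative signals."""
--     text_lower = (text or "").lower()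
--     positive = nlp_config.get("positive") or {}
--     negative = nlp_config.get("negative") or {}
--
--     positive_hits: dict[str, List[str]] = {}
--     for group, payload in positive.items():
--         keywords = payload.get("keywords") or []
--         if keywords:
--             hits = _unique_hits(text_lower, keywords)
--             if hits:
--                 positive_hits[group] = hits
--
--     negative_hits: dict[str, List[str]] = {}
--     for group, payload in negative.items():
--         keywords = payload.get("keywords") or []
--         if keywords:
--             hits = _unique_hits(text_lower, keywords)
--             if hits:
--                 negative_hits[group] = hits
--
--     # Context rules
--     has_light_positive = bool(positive_hits.get("light"))
--     if not has_light_positive and "dark" in negative_hits: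
--         pass
--     else:
--         negative_hits.pop("dark", None)
--
--     return {
--         "positive_hits": positive_hits,
--         "negative_hits": negative_hits,
--     }
-- ===== SOURCE B (Python) =====
-- def analyze_text_signals(text: str, nlp_config: dict) -> dict:
--     """Analyze description text for buyer-specific positive/negative signals."""
--     text_lower = (text or "").lower()
--
--     def groups_of(name):
--         sec = nlp_config.get(name) or {}
--         return [(g, list(dict.fromkeys(p.get("keywords") or []))) for g, p in sec.items()]
--
--     pos_groups = groups_of("positive")
--     neg_groups = groups_of("negative")
--
--     # Phase 1: inverted loop nest — every DISTINCT keyword of the whole config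
--     # (across all groups of both sections) is tested against the text exactly once,
--     # into a memo set.
--     matched = set()
--     for kw in dict.fromkeys(k for _, kws in pos_groups + neg_groups for k in kws):
--         if kw in text_lower:
--             matched.add(kw)
--
--     # Phase 2: per-group hit lists are pure memo lookups.
--     def pick(groups):
--         out = {}
--         for g, kws in groups:
--             hits = [k for k in kws if k in matched]
--             if hits:
--                 out[g] = hits
--         return out
--
--     positive_hits = pick(pos_groups)
--     negative_hits = pick(neg_groups)
--
--     # "dark" negatives only count when there is no "light" positive signal
--     if positive_hits.get("light"):
--         negative_hits.pop("dark", None)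
--
--     return {"positive_hits": positive_hits, "negative_hits": negative_hits}
-- ===== Notes on version B (the rewrite author's own statement) =====
-- stated objective: alternative
-- what changed: B inverts A's loop nest into two phases: it first builds a memo set by testing every distinct keyword of the whole config (deduplicated across all groups of both sections) against the text exactly once, then assembles each group's hit list by pure memo lookups and decides the 'dark' rule directly, so A's per-group substring scans and its filter-then-seen-set hit-dedup loop disappear.
import Mathlib
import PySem

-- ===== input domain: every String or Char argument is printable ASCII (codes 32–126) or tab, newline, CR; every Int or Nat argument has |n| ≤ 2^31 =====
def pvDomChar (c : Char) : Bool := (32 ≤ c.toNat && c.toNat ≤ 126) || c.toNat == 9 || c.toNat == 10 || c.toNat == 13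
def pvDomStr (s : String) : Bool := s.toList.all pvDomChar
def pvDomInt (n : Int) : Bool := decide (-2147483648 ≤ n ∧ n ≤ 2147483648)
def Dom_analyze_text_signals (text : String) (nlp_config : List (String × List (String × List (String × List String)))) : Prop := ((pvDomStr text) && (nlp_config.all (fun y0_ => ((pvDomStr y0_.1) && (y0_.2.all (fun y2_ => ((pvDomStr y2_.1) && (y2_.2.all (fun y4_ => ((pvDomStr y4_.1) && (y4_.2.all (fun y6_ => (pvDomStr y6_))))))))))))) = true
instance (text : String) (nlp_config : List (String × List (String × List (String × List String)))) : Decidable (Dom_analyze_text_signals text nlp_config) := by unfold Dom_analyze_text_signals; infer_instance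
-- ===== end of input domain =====

-- B inverts A's loop nest: every DISTINCT keyword (across all groups of both
-- sections) is tested against the text exactly once, into a memo set; per-group
-- hit lists are then pure memo lookups — instead of A's per-group substring
-- tests and filter-then-seen-set hit dedup.

-- ===== PORT A =====
-- _unique_hits: filter by substring, then dedup with a 'seen' set while appending
def pvUniqueHits (text_lower : String) (keywords : List String) : List String :=
  let hits := keywords.filter (fun kw => PySem.Str.isIn kw text_lower)
  (hits.foldl
    (fun (st : List String × PySem.Set String) hit =>
      if PySem.Set.contains st.2 hit then st
      else (st.1 ++ [hit], PySem.Set.add st.2 hit))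
    ([], PySem.Set.empty)).1

-- the two identical group loops of A, as a helper over one section
def pvSectionLoopA (text_lower : String)
    (sec : List (String × List (String × List String))) : PySem.Dict String (List String) :=
  sec.foldl
    (fun (d : PySem.Dict String (List String)) gp =>
      let keywords := (List.lookup "keywords" gp.2).getD []   -- payload.get("keywords") or []
      if keywords ≠ [] then
        let hits := pvUniqueHits text_lower keywords
        if hits ≠ [] then d.insert gp.1 hits else d
      else d)
    PySem.Dict.empty

def analyze_text_signals (text : String) (nlp_config : List (String × List (String × List (String × List String)))) : List (String × List (String × List String)) :=
  let text_lower := PySem.Str.lower (if text == "" then "" else text)  -- (text or "").lower()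
  let positive := (List.lookup "positive" nlp_config).getD []          -- .get("positive") or {}
  let negative := (List.lookup "negative" nlp_config).getD []
  let positive_hits := pvSectionLoopA text_lower positive
  let negative_hits := pvSectionLoopA text_lower negative
  let has_light_positive := !(PySem.Dict.getD positive_hits "light" []).isEmpty
  let negative_hits :=
    if !has_light_positive && PySem.Dict.contains negative_hits "dark" then
      negative_hits                                                    -- pass
    else
      negative_hits.erase "dark"                                      -- pop("dark", None)
  [("positive_hits", positive_hits.items), ("negative_hits", negative_hits.items)]

-- ===== PORT B =====
-- groups_of: one section as (group, deduped keyword list) pairs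
def pvGroupsOfList (sec : List (String × List (String × List String))) : List (String × List String) :=
  sec.map (fun gp => (gp.1, PySem.List.dedup ((List.lookup "keywords" gp.2).getD [])))

-- phase 2: hit lists by memo lookup
def pvPick (matched : PySem.Set String) (groups : List (String × List String)) : PySem.Dict String (List String) :=
  groups.foldl
    (fun (out : PySem.Dict String (List String)) gk =>
      let hits := gk.2.filter (fun k => PySem.Set.contains matched k)
      if hits.isEmpty then out else out.insert gk.1 hits)
    PySem.Dict.empty

def analyze_text_signals_alt (text : String) (nlp_config : List (String × List (String × List (String × List String)))) : List (String × List (String × List String)) :=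
  let text_lower := PySem.Str.lower (if text == "" then "" else text)
  let pos_groups := pvGroupsOfList ((List.lookup "positive" nlp_config).getD [])
  let neg_groups := pvGroupsOfList ((List.lookup "negative" nlp_config).getD [])
  -- phase 1: test each distinct keyword of the whole config once
  let matched : PySem.Set String :=
    (PySem.List.dedup ((pos_groups ++ neg_groups).flatMap (fun gk => gk.2))).foldl
      (fun s kw => if PySem.Str.isIn kw text_lower then PySem.Set.add s kw else s)
      PySem.Set.empty
  let positive_hits := pvPick matched pos_groups
  let negative_hits := pvPick matched neg_groups
  let negative_hits :=
    if (PySem.Dict.getD positive_hits "light" []).isEmpty then negative_hits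
    else negative_hits.erase "dark"
  [("positive_hits", positive_hits.items), ("negative_hits", negative_hits.items)]

-- ===== PRECONDITION & SPEC =====
def Spec_analyze_text_signals (text : String) (nlp_config : List (String × List (String × List (String × List String)))) (out : List (String × List (String × List String))) : Prop := out = analyze_text_signals_alt text nlp_config
instance (text : String) (nlp_config : List (String × List (String × List (String × List String)))) (out : List (String × List (String × List String))) : Decidable (Spec_analyze_text_signals text nlp_config out) := by unfold Spec_analyze_text_signals; infer_instance

-- ===== CLAIM (what is proved, stated in full; the proofs are below) =====
def Claim_equal_analyze_text_signals : Prop := ∀ (text : String) (nlp_config : List (String × List (String × List (String × List String)))), Dom_analyze_text_signals text nlp_config → Spec_analyze_text_signals text nlp_config (analyze_text_signals text nlp_config)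

-- ===== LEMMAS AND PROOFS =====

-- membership in B's memo-building fold
lemma pvMemScanFold (p : String → Bool) (xs acc : List String) (k : String) :
    k ∈ xs.foldl (fun s x => if p x then PySem.Set.add s x else s) acc ↔
      k ∈ acc ∨ (k ∈ xs ∧ p k = true) := by
  induction xs generalizing acc with
  | nil => simp
  | cons x t ih =>
      by_cases hp : p x = true
      · by_cases hk : k = x
        · subst hk
          simp [hp, ih, PySem.Set.mem_add]
        · simp only [List.foldl_cons, hp, if_true, ih, PySem.Set.mem_add, List.mem_cons]
          tauto
      · simp only [Bool.not_eq_true] at hp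
        by_cases hk : k = x
        · subst hk
          simp [hp, ih]
        · simp only [List.foldl_cons, hp, Bool.false_eq_true, if_false, ih, List.mem_cons]
          tauto

-- A's dedup loop carries (deduped list, seen set); on a diagonal start the two components coincide
lemma pvFoldDiag (hits : List String) (l : List String) :
    (hits.foldl
      (fun (st : List String × PySem.Set String) hit =>
        if PySem.Set.contains st.2 hit then st
        else (st.1 ++ [hit], PySem.Set.add st.2 hit))
      (l, l)).1 = hits.foldl PySem.Set.add l := by
  induction hits generalizing l with
  | nil => rfl
  | cons h t ih =>
      by_cases hc : h ∈ l
      · simpa [PySem.Set.add, PySem.Set.contains, List.contains_eq_mem, hc]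
          using ih l
      · simpa [PySem.Set.add, PySem.Set.contains, List.contains_eq_mem, hc]
          using ih (l ++ [h])

-- filtering commutes with building the seen-set (ordered dedup)
lemma pvFilterFoldAdd (P : String → Bool) (xs s : List String) :
    (xs.filter P).foldl PySem.Set.add (s.filter P)
      = (xs.foldl PySem.Set.add s).filter P := by
  induction xs generalizing s with
  | nil => rfl
  | cons x t ih =>
      by_cases hp : P x = true
      · have hmem : x ∈ s.filter P ↔ x ∈ s := by simp [List.mem_filter, hp]
        by_cases hc : x ∈ s
        · simpa [hp, PySem.Set.add, PySem.Set.contains, List.contains_eq_mem, hc,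
            hmem.mpr hc] using ih s
        · have hfil : (s ++ [x]).filter P = s.filter P ++ [x] := by simp [hp]
          simpa [hp, PySem.Set.add, PySem.Set.contains, List.contains_eq_mem, hc,
            hmem, hfil] using ih (s ++ [x])
      · simp only [Bool.not_eq_true] at hp
        by_cases hc : x ∈ s
        · simpa [hp, PySem.Set.add, PySem.Set.contains, List.contains_eq_mem, hc]
            using ih s
        · have hfil : (s ++ [x]).filter P = s.filter P := by simp [hp]
          simpa [hp, PySem.Set.add, PySem.Set.contains, List.contains_eq_mem, hc,
            hfil] using ih (s ++ [x])

-- A's _unique_hits = dedup-then-filter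
lemma pvUniqueHits_eq (tl : String) (kws : List String) :
    pvUniqueHits tl kws
      = (PySem.List.dedup kws).filter (fun kw => PySem.Str.isIn kw tl) := by
  simp only [pvUniqueHits, PySem.Set.empty]
  rw [pvFoldDiag _ []]
  have := pvFilterFoldAdd (fun kw => PySem.Str.isIn kw tl) kws []
  simpa [PySem.List.dedup, PySem.Set.ofList, PySem.Set.empty] using this

-- B's pick over a memo that answers substring membership on every group keyword = A's section loop
lemma pvPick_eq (tl : String) (matched : PySem.Set String)
    (sec : List (String × List (String × List String)))
    (h : ∀ gp ∈ sec, ∀ k ∈ PySem.List.dedup ((List.lookup "keywords" gp.2).getD []),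
      PySem.Set.contains matched k = PySem.Str.isIn k tl) :
    pvPick matched (pvGroupsOfList sec) = pvSectionLoopA tl sec := by
  unfold pvPick pvGroupsOfList pvSectionLoopA
  rw [List.foldl_map]
  apply List.foldl_ext
  intro d gp hgp
  have hf : (PySem.List.dedup ((List.lookup "keywords" gp.2).getD [])).filter
      (fun k => PySem.Set.contains matched k)
      = (PySem.List.dedup ((List.lookup "keywords" gp.2).getD [])).filter
      (fun kw => PySem.Str.isIn kw tl) :=
    List.filter_congr (fun k hk => h gp hgp k hk)
  simp only [hf, pvUniqueHits_eq]
  rcases hkws : (List.lookup "keywords" gp.2).getD [] with _ | ⟨a, as⟩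
  · simp [PySem.List.dedup, PySem.Set.ofList]
  · by_cases hh : (PySem.List.dedup (a :: as)).filter (fun kw => PySem.Str.isIn kw tl) = []
    · have hie : ((PySem.List.dedup (a :: as)).filter (fun kw => PySem.Str.isIn kw tl)).isEmpty = true :=
        List.isEmpty_iff.mpr hh
      rw [if_pos hie, if_pos (by simp : (a :: as) ≠ []), if_neg (not_not_intro hh)]
    · have hie : ((PySem.List.dedup (a :: as)).filter (fun kw => PySem.Str.isIn kw tl)).isEmpty = false := by
        simpa [List.isEmpty_iff] using hh
      simp only [hie, ne_eq, reduceCtorEq, not_false_eq_true, if_true, Bool.false_eq_true, if_false]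
      exact (if_pos hh).symm

-- erasing an absent key is a no-op
lemma pvErase_absent {ν : Type} (d : PySem.Dict String ν) (k : String)
    (h : PySem.Dict.contains d k = false) : d.erase k = d := by
  rcases d with ⟨items⟩
  simp only [PySem.Dict.contains, List.any_eq_false] at h
  simp only [PySem.Dict.erase, PySem.Dict.mk.injEq]
  apply List.filter_eq_self.mpr
  intro p hp
  simpa using h p hp

-- ===== VERDICT (by name: the statement is the Claim_ definition above) =====
theorem analyze_text_signals_spec : Claim_equal_analyze_text_signals := by
  intro text nlp_config _
  unfold Spec_analyze_text_signals analyze_text_signals analyze_text_signals_alt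
  simp only []
  set tl := PySem.Str.lower (if text == "" then "" else text) with htl
  set posSec := (List.lookup "positive" nlp_config).getD [] with hpos
  set negSec := (List.lookup "negative" nlp_config).getD [] with hneg
  set allkws := (pvGroupsOfList posSec ++ pvGroupsOfList negSec).flatMap (fun gk => gk.2) with hall
  set matched : PySem.Set String :=
    (PySem.List.dedup allkws).foldl
      (fun s kw => if PySem.Str.isIn kw tl then PySem.Set.add s kw else s)
      PySem.Set.empty with hmatched
  have hcont : ∀ (sec : List (String × List (String × List String))),
      (sec = posSec ∨ sec = negSec) →
      pvPick matched (pvGroupsOfList sec) = pvSectionLoopA tl sec := by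
    intro sec hsec
    apply pvPick_eq
    intro gp hgp k hk
    have hkall : k ∈ allkws := by
      apply List.mem_flatMap.mpr
      refine ⟨(gp.1, PySem.List.dedup ((List.lookup "keywords" gp.2).getD [])), ?_, hk⟩
      rcases hsec with h1 | h1 <;> subst h1
      · exact List.mem_append_left _ (List.mem_map_of_mem hgp)
      · exact List.mem_append_right _ (List.mem_map_of_mem hgp)
    have hmem : k ∈ matched ↔ PySem.Str.isIn k tl = true := by
      rw [hmatched]
      rw [pvMemScanFold (fun x => PySem.Str.isIn x tl)]
      simp [PySem.Set.empty, hkall]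
    rw [Bool.eq_iff_iff]
    constructor
    · intro hc
      exact hmem.mp (by simpa [PySem.Set.contains, List.contains_eq_mem] using hc)
    · intro hc
      have := hmem.mpr hc
      simpa [PySem.Set.contains, List.contains_eq_mem] using this
  rw [hcont posSec (Or.inl rfl), hcont negSec (Or.inr rfl)]
  set pos := pvSectionLoopA tl posSec
  set neg := pvSectionLoopA tl negSec
  by_cases hl : (PySem.Dict.getD pos "light" []).isEmpty = true
  · by_cases hd : PySem.Dict.contains neg "dark" = true
    · simp [hl, hd]
    · simp only [Bool.not_eq_true] at hd
      simp [hl, hd, pvErase_absent neg "dark" hd]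
  · simp only [Bool.not_eq_true] at hl
    simp [hl]
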